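-- pv_equiv track=rewrite | github.com/A-Yerkeshev/python-ohjelmointi-tehtavat | osa04-25_naapureita_listassa/src/naapureita_listassa.py | pisin_naapurijono
-- ===== SOURCE A (Python) =====
-- def pisin_naapurijono(l:list) -> int:
--   row = []
--   res = 0
--
--   for n in l:
--     if row == [] or n-row[-1] == 1 or row[-1]-n == 1:
--       row.append(n)
--     else:
--       row = [n]
--
--     if len(row) > res:
--       res = len(row)
--
--   return res
-- ===== SOURCE B (Python) =====
-- def pisin_naapurijono(l: list) -> int:
--     # Two-pointer scan: for each run start i, skip j ahead to the run's end,
--     # record the run length j - i, and jump to the next run start.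
--     best = 0
--     n = len(l)
--     i = 0
--     while i < n:
--         j = i + 1
--         while j < n and abs(l[j] - l[j - 1]) == 1:
--             j += 1
--         best = max(best, j - i)
--         i = j
--     return best
-- ===== Notes on version B (the rewrite author's own statement) =====
-- stated objective: alternative
-- what changed: B replaces A's per-element fold that materialises the current run as a growing list with a two-pointer index scan that jumps run-by-run: an inner loop finds each maximal run's end, the outer loop hops between run starts and keeps the longest length.
import Mathlib
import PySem

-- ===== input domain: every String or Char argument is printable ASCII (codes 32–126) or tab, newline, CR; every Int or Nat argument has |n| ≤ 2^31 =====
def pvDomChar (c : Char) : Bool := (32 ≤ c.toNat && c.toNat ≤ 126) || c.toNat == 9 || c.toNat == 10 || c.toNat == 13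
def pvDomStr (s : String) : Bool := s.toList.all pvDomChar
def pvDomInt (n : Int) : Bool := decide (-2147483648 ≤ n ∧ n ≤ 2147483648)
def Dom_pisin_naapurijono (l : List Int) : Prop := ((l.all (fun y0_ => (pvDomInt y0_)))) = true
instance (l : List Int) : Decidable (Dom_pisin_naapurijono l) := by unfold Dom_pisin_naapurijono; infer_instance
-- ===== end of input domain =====

-- B replaces A's per-element fold carrying the current run as a list by a two-pointer
-- index scan that finds each maximal run's end and hops run-by-run; alternative, not a speed claim.

-- ===== PORT A =====
-- A's loop state: the current run list `row` and the best length so far `res`.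
def pvStepA (st : List Int × Int) (n : Int) : List Int × Int :=
  let row := if st.1 = [] then st.1 ++ [n]
             else if n - st.1.getLast! = 1 ∨ st.1.getLast! - n = 1 then st.1 ++ [n]
             else [n]
  let res := if (row.length : Int) > st.2 then (row.length : Int) else st.2
  (row, res)

def pisin_naapurijono (l : List Int) : Int :=
  (l.foldl pvStepA ([], 0)).2

-- ===== PORT B =====
-- inner while loop: advance j while j < n and |l[j] - l[j-1]| == 1.
-- every access l[j], l[j-1] has 0 ≤ j-1 < j < n = l.length, so List.getD is exact here.
def pvRunEnd (l : List Int) (n : Nat) (j : Nat) : Nat :=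
  if j < n ∧ ((l.getD j 0) - (l.getD (j - 1) 0)).natAbs = 1 then
    pvRunEnd l n (j + 1)
  else j
termination_by n - j
decreasing_by omega

theorem pvRunEnd_ge (l : List Int) (n j : Nat) : j ≤ pvRunEnd l n j := by
  unfold pvRunEnd
  split
  · exact le_trans (by omega) (pvRunEnd_ge l n (j + 1))
  · exact le_refl j
termination_by n - j
decreasing_by omega

-- outer while loop: i hops from run start to run start, keeping the best length.
def pvScan (l : List Int) (n : Nat) (i : Nat) (best : Int) : Int :=
  if _h : i < n then
    let j := pvRunEnd l n (i + 1)
    pvScan l n j (max best ((j : Int) - (i : Int)))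
  else best
termination_by n - i
decreasing_by
  have := pvRunEnd_ge l n (i + 1)
  omega

def pisin_naapurijono_alt (l : List Int) : Int :=
  pvScan l l.length 0 0

-- ===== PRECONDITION & SPEC =====
def Spec_pisin_naapurijono (l : List Int) (out : Int) : Prop := out = pisin_naapurijono_alt l
instance (l : List Int) (out : Int) : Decidable (Spec_pisin_naapurijono l out) := by unfold Spec_pisin_naapurijono; infer_instance

-- ===== CLAIM (what is proved, stated in full; the proofs are below) =====
def Claim_equal_pisin_naapurijono : Prop := ∀ (l : List Int), Dom_pisin_naapurijono l → Spec_pisin_naapurijono l (pisin_naapurijono l)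

-- ===== LEMMAS AND PROOFS =====

-- proof-only bridge: the length of the run continuation after `prev` in `rest`.
def pvRunLen : Int → List Int → Nat
  | _, [] => 0
  | prev, n :: rest => if (n - prev).natAbs = 1 then 1 + pvRunLen n rest else 0

-- proof-only bridge: the answer as a recursion over maximal runs.
def pvAltRec : List Int → Int
  | [] => 0
  | x :: rest =>
    max (1 + (pvRunLen x rest : Int)) (pvAltRec (rest.drop (pvRunLen x rest)))
termination_by l => l.length
decreasing_by
  simp only [List.length_cons, List.length_drop]
  omega

theorem pv_getLast!_concat (row : List Int) (n : Int) : (row ++ [n]).getLast! = n := by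
  simp [List.getLast!_eq_getLast?_getD]

theorem pvRunLen_le (prev : Int) (rest : List Int) : pvRunLen prev rest ≤ rest.length := by
  induction rest generalizing prev with
  | nil => simp [pvRunLen]
  | cons n r ih =>
    simp only [pvRunLen, List.length_cons]
    split
    · have := ih n; omega
    · omega

-- A-side characterisation: the fold over the tail equals the run-recursive answer.
theorem pv_A_key (rest : List Int) : ∀ (row : List Int) (res : Int),
    row ≠ [] → (row.length : Int) ≤ res → 1 ≤ res →
    (List.foldl pvStepA (row, res) rest).2
      = max res (max ((row.length : Int) + (pvRunLen row.getLast! rest : Int))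
                     (pvAltRec (rest.drop (pvRunLen row.getLast! rest)))) := by
  induction rest with
  | nil =>
    intro row res _ hlen hres
    simp only [List.foldl_nil, pvRunLen, List.drop_nil, pvAltRec]
    omega
  | cons n rest ih =>
    intro row res hrow hlen hres
    simp only [List.foldl_cons]
    by_cases ht : (n - row.getLast!).natAbs = 1
    · have hadj : n - row.getLast! = 1 ∨ row.getLast! - n = 1 := by omega
      have hA : pvStepA (row, res) n = (row ++ [n], max res ((row.length : Int) + 1)) := by
        simp only [pvStepA, if_neg hrow, if_pos hadj]
        congr 1
        simp only [List.length_append, List.length_cons, List.length_nil]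
        push_cast
        split_ifs <;> omega
      rw [hA]
      have hstep := ih (row ++ [n]) (max res ((row.length : Int) + 1)) (by simp)
        (by simp only [List.length_append, List.length_cons, List.length_nil]; push_cast; omega)
        (by omega)
      rw [pv_getLast!_concat] at hstep
      rw [hstep]
      have hr : pvRunLen row.getLast! (n :: rest) = 1 + pvRunLen n rest := by
        simp only [pvRunLen, if_pos ht]
      rw [hr]
      have hd : (n :: rest).drop (1 + pvRunLen n rest) = rest.drop (pvRunLen n rest) := by
        simp [List.drop_succ_cons, Nat.add_comm]
      rw [hd]
      simp only [List.length_append, List.length_cons, List.length_nil]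
      push_cast
      omega
    · have hadj : ¬ (n - row.getLast! = 1 ∨ row.getLast! - n = 1) := by omega
      have hA : pvStepA (row, res) n = ([n], res) := by
        simp only [pvStepA, if_neg hrow, if_neg hadj]
        congr 1
        simp only [List.length_cons, List.length_nil]
        rw [if_neg]; omega
      rw [hA]
      have hstep := ih [n] res (by simp) (by simp; omega) hres
      simp only [List.getLast!_eq_getLast?_getD, List.getLast?_singleton, Option.getD_some,
        List.length_cons, List.length_nil] at hstep
      rw [hstep]
      have hr : pvRunLen row.getLast! (n :: rest) = 0 := by
        simp only [pvRunLen, if_neg ht]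
      rw [hr]
      simp only [List.drop_zero]
      have halt : pvAltRec (n :: rest)
          = max (1 + (pvRunLen n rest : Int)) (pvAltRec (rest.drop (pvRunLen n rest))) := by
        rw [pvAltRec]
      rw [halt]
      push_cast
      omega

-- B-side bridge 1: the inner loop's endpoint via pvRunLen.
theorem pv_runEnd_eq (l : List Int) : ∀ (j : Nat), 1 ≤ j →
    pvRunEnd l l.length j = j + pvRunLen (l.getD (j - 1) 0) (l.drop j) := by
  intro j hj
  by_cases h : j < l.length
  · have hdrop : l.drop j = l.getD j 0 :: l.drop (j + 1) := by
      rw [List.drop_eq_getElem_cons h]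
      congr 1
      simp [List.getD, List.getElem?_eq_getElem h]
    by_cases ht : ((l.getD j 0) - (l.getD (j - 1) 0)).natAbs = 1
    · rw [pvRunEnd, if_pos ⟨h, ht⟩]
      rw [pv_runEnd_eq l (j + 1) (by omega), Nat.add_sub_cancel, hdrop]
      simp only [pvRunLen, if_pos ht]
      omega
    · rw [pvRunEnd, if_neg (by tauto), hdrop]
      simp only [pvRunLen, if_neg ht]
      omega
  · have hdrop : l.drop j = [] := List.drop_eq_nil_of_le (by omega)
    rw [pvRunEnd, if_neg (by tauto), hdrop]
    simp [pvRunLen]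
termination_by j => l.length - j
decreasing_by omega

theorem pv_runEnd_le (l : List Int) (j : Nat) (hj : 1 ≤ j) (h : j ≤ l.length) :
    pvRunEnd l l.length j ≤ l.length := by
  rw [pv_runEnd_eq l j hj]
  have h1 := pvRunLen_le (l.getD (j - 1) 0) (l.drop j)
  simp only [List.length_drop] at h1
  omega

-- B-side bridge 2: the outer loop computes max best (pvAltRec (l.drop i)).
theorem pv_scan_eq (l : List Int) : ∀ (i : Nat) (best : Int), i ≤ l.length → 0 ≤ best →
    pvScan l l.length i best = max best (pvAltRec (l.drop i)) := by
  intro i best hi hb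
  by_cases h : i < l.length
  · have hdrop : l.drop i = l.getD i 0 :: l.drop (i + 1) := by
      rw [List.drop_eq_getElem_cons h]
      congr 1
      simp [List.getD, List.getElem?_eq_getElem h]
    have hre : pvRunEnd l l.length (i + 1)
        = (i + 1) + pvRunLen (l.getD i 0) (l.drop (i + 1)) := by
      have := pv_runEnd_eq l (i + 1) (by omega)
      simpa using this
    set R := pvRunLen (l.getD i 0) (l.drop (i + 1)) with hR
    have hRle : R ≤ l.length - (i + 1) := by
      have := pvRunLen_le (l.getD i 0) (l.drop (i + 1))
      simpa [List.length_drop] using this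
    rw [pvScan, dif_pos h]
    have hjle : pvRunEnd l l.length (i + 1) ≤ l.length := pv_runEnd_le l (i + 1) (by omega) (by omega)
    have ih := pv_scan_eq l (pvRunEnd l l.length (i + 1))
        (max best ((pvRunEnd l l.length (i + 1) : Int) - (i : Int))) hjle (by positivity)
    rw [ih]
    have hdj : l.drop (pvRunEnd l l.length (i + 1)) = (l.drop (i + 1)).drop R := by
      rw [hre, List.drop_drop]
    rw [hdj, hdrop]
    have halt : pvAltRec (l.getD i 0 :: l.drop (i + 1))
        = max (1 + (R : Int)) (pvAltRec ((l.drop (i + 1)).drop R)) := by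
      rw [pvAltRec, ← hR]
    rw [halt, hre]
    push_cast
    omega
  · have hdrop : l.drop i = [] := List.drop_eq_nil_of_le (by omega)
    rw [pvScan, dif_neg h, hdrop]
    simp only [pvAltRec]
    omega
termination_by i => l.length - i
decreasing_by
  have := pvRunEnd_ge l l.length (i + 1)
  omega

-- ===== VERDICT (by name: the statement is the Claim_ definition above) =====
theorem pisin_naapurijono_spec : Claim_equal_pisin_naapurijono := by
  intro l _
  unfold Spec_pisin_naapurijono pisin_naapurijono pisin_naapurijono_alt
  cases l with
  | nil => simp [pvScan]
  | cons x rest =>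
    simp only [List.foldl_cons]
    have hA0 : pvStepA ([], 0) x = ([x], 1) := by simp [pvStepA]
    rw [hA0]
    have hA := pv_A_key rest [x] 1 (by simp) (by simp) (by omega)
    simp only [List.getLast!_eq_getLast?_getD, List.getLast?_singleton, Option.getD_some,
      List.length_cons, List.length_nil] at hA
    rw [hA]
    have hB := pv_scan_eq (x :: rest) 0 0 (by omega) (by omega)
    rw [hB]
    have hdrop0 : (x :: rest).drop 0 = x :: rest := rfl
    rw [hdrop0]
    have halt : pvAltRec (x :: rest)
        = max (1 + (pvRunLen x rest : Int)) (pvAltRec (rest.drop (pvRunLen x rest))) := by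
      rw [pvAltRec]
    rw [halt]
    push_cast
    omega
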